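-- pv_equiv track=rewrite | github.com/swwho96/algo | programmers/Level_3/NumberGame.py | solution
-- ===== SOURCE A (Python) =====
-- from bisect import bisect_right
--
-- def solution(A, B):
--     win = 0
--     B = sorted(B)
--     for a in A:
--         next_player = bisect_right(B, a)
--         if next_player < len(B):
--             win += 1
--             B.pop(next_player) # 게임을 이길 수 있을 경우
--         else:
--             B.pop(0) # 게임을 이길 수 없을 경우
--     return win
-- ===== SOURCE B (Python) =====
-- def solution(A, B):
--     sa = sorted(A)
--     sb = sorted(B)
--     win = 0
--     i = 0
--     for b in sb:
--         if i < len(sa) and sa[i] < b: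
--             win += 1
--             i += 1
--     return win
-- ===== Notes on version B (the rewrite author's own statement) =====
-- stated objective: faster
-- what changed: A re-sorts B and then, for every element of A, does a bisect plus an O(n) list.pop (O(n^2) total); B sorts both lists once and counts the matching with a single two-pointer merge pass, with a proof that processing A in its original order yields the same count as the sorted two-pointer greedy.
import Mathlib
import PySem

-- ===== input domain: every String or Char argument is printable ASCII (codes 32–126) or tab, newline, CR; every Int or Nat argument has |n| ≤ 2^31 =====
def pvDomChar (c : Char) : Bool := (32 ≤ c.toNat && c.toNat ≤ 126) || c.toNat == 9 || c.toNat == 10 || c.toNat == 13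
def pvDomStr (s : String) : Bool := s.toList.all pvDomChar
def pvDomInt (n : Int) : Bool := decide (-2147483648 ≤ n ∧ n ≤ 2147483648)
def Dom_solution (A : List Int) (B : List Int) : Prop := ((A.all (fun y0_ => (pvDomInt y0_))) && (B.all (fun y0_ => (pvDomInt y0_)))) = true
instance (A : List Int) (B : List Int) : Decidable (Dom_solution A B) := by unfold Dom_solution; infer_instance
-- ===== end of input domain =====

-- B replaces A's per-element bisect + O(n) list.pop with one sorted two-pointer merge pass
-- (equal return value proved below; A raises IndexError when len(B) < len(A), excluded by Pre_).

-- ===== PORT A =====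
-- for a in A: bisect into the sorted remainder of B, pop the found index (win) or index 0 (loss)
def solutionLoop (As : List Int) (win : Int) (Bs : List Int) : Int :=
  match As with
  | [] => win
  | a :: rest =>
    let np := PySem.List.bisectRight Bs a
    if np < Bs.length then
      solutionLoop rest (win + 1) (((PySem.List.pop? Bs (np : Int)).map Prod.snd).getD [])
    else
      -- B.pop(0); raises IndexError on an empty list — those inputs are outside Pre_solution
      solutionLoop rest win (((PySem.List.pop? Bs 0).map Prod.snd).getD [])

def solution (A : List Int) (B : List Int) : Int :=
  solutionLoop A 0 (PySem.List.sorted B (fun x => x))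

-- ===== PORT B =====
-- for b in sorted(B): match it against sa[i], the smallest not-yet-beaten element of sorted(A)
def altLoop (sa : List Int) (sb : List Int) (i : Nat) (win : Int) : Int :=
  match sb with
  | [] => win
  | b :: rest =>
    if i < sa.length && decide (PySem.List.pyGetD sa (i : Int) 0 < b) then
      altLoop sa rest (i + 1) (win + 1)
    else
      altLoop sa rest i win

def solution_alt (A : List Int) (B : List Int) : Int :=
  altLoop (PySem.List.sorted A (fun x => x)) (PySem.List.sorted B (fun x => x)) 0 0

-- ===== PRECONDITION & SPEC =====
-- Pre_ excludes exactly the inputs where A raises IndexError: len(B) < len(A) empties B mid-loop.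
def Pre_solution (A : List Int) (B : List Int) : Prop := A.length ≤ B.length
instance (A : List Int) (B : List Int) : Decidable (Pre_solution A B) := by unfold Pre_solution; infer_instance

def pvWitness_solution : List Int × List Int := ([1], [2, 3])

def Spec_solution (A : List Int) (B : List Int) (out : Int) : Prop := out = solution_alt A B
instance (A : List Int) (B : List Int) (out : Int) : Decidable (Spec_solution A B out) := by unfold Spec_solution; infer_instance

-- ===== CLAIM (what is proved, stated in full; the proofs are below) =====
def Claim_equal_solution : Prop := ∀ (A : List Int) (B : List Int), Dom_solution A B → Pre_solution A B → Spec_solution A B (solution A B)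

-- ===== LEMMAS AND PROOFS =====

-- the two-pointer count, abstracted from altLoop
def tpCount : List Int → List Int → Int
  | _, [] => 0
  | [], _ :: _ => 0
  | a :: as, b :: bs => if a < b then 1 + tpCount as bs else tpCount (a :: as) bs

@[simp] lemma tpCount_nil_left (bs : List Int) : tpCount [] bs = 0 := by
  cases bs <;> rfl

@[simp] lemma tpCount_nil_right (as : List Int) : tpCount as [] = 0 := by
  cases as <;> rfl

lemma tpCount_cons_cons (a b : Int) (as bs : List Int) :
    tpCount (a :: as) (b :: bs) = if a < b then 1 + tpCount as bs else tpCount (a :: as) bs := rfl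

-- sorted insertion by takeWhile/dropWhile, the shape the proofs use
def insT (a : Int) (as : List Int) : List Int :=
  as.takeWhile (fun x => decide (x < a)) ++ a :: as.dropWhile (fun x => decide (x < a))

lemma insT_perm (a : Int) (as : List Int) : (insT a as).Perm (a :: as) := by
  have h := List.perm_middle (a := a) (l₁ := as.takeWhile (fun x => decide (x < a)))
    (l₂ := as.dropWhile (fun x => decide (x < a)))
  simpa [insT, List.takeWhile_append_dropWhile] using h

lemma dropWhile_head_false {p : Int → Bool} {l l' : List Int} {b : Int}
    (h : l.dropWhile p = b :: l') : p b = false := by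
  induction l with
  | nil => simp at h
  | cons c l ih =>
    by_cases hc : p c
    · rw [List.dropWhile_cons_of_pos hc] at h; exact ih h
    · rw [List.dropWhile_cons_of_neg hc] at h
      cases h; simpa using hc

lemma eraseIdx_len_append (t : List Int) (b : Int) (d' : List Int) :
    (t ++ b :: d').eraseIdx t.length = t ++ d' := by
  induction t with
  | nil => simp
  | cons x t ih => simpa [List.eraseIdx_cons_succ] using ih

lemma getElem_len_append (t : List Int) (b : Int) (d' : List Int) :
    (t ++ b :: d')[t.length]'(by simp) = b := by
  induction t with
  | nil => simp
  | cons x t ih => simp [ih]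

lemma getElem_append_left' (t d : List Int) (n : Nat) (hn : n < t.length) :
    (t ++ d)[n]'(by simp; omega) = t[n]'hn := by
  induction t generalizing n with
  | nil => simp at hn
  | cons x t ih =>
    cases n with
    | zero => simp
    | succ n => simpa using ih n (by simpa using hn)

lemma sorted_dropWhile_lt_ge {a : Int} {as : List Int}
    (has : as.Pairwise (· ≤ ·)) :
    ∀ y ∈ as.dropWhile (fun x => decide (x < a)), a ≤ y := by
  induction as with
  | nil => simp
  | cons c l ih =>
    rcases List.pairwise_cons.mp has with ⟨hc, hl⟩
    by_cases hca : c < a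
    · rw [List.dropWhile_cons_of_pos (by simpa using hca)]
      exact ih hl
    · rw [List.dropWhile_cons_of_neg (by simpa using hca)]
      intro y hy
      rcases List.mem_cons.mp hy with rfl | hy
      · omega
      · have := hc y hy; omega

lemma insT_pairwise (a : Int) (as : List Int) (has : as.Pairwise (· ≤ ·)) :
    (insT a as).Pairwise (· ≤ ·) := by
  unfold insT
  rw [List.pairwise_append]
  refine ⟨List.Pairwise.sublist (List.takeWhile_sublist _) has, ?_, ?_⟩
  · rw [List.pairwise_cons]
    exact ⟨sorted_dropWhile_lt_ge has, List.Pairwise.sublist (List.dropWhile_sublist _) has⟩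
  · intro x hx y hy
    have hxa : x < a := by
      have := List.mem_takeWhile_imp hx; simpa using this
    rcases List.mem_cons.mp hy with rfl | hy
    · omega
    · have := sorted_dropWhile_lt_ge has y hy; omega

lemma sorted_cons_eq_insT (a : Int) (rest : List Int) :
    PySem.List.sorted (a :: rest) (fun x => x) =
      insT a (PySem.List.sorted rest (fun x => x)) := by
  apply PySem.List.sorted_id_eq_of_perm_of_pairwise
  · exact (insT_perm a _).trans ((PySem.List.sorted_perm rest (fun x => x) false).cons a)
  · exact insT_pairwise a _ (by simpa using PySem.List.sorted_pairwise rest (fun x => x))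

-- no b can beat anything in ys ⇒ ys contributes nothing
lemma tpCount_zero_of_forall {ys bs : List Int}
    (h : ∀ b ∈ bs, ∀ y ∈ ys, ¬ (y < b)) : tpCount ys bs = 0 := by
  induction bs generalizing ys with
  | nil => simp
  | cons b bs ih =>
    cases ys with
    | nil => simp
    | cons y ys' =>
      rw [tpCount_cons_cons, if_neg (h b (by simp) y (by simp))]
      exact ih (fun b' hb' y' hy' => h b' (by simp [hb']) y' hy')

-- appending unbeatable elements on the right changes nothing
lemma tpCount_append_right {xs ys bs : List Int}
    (h : ∀ b ∈ bs, ∀ y ∈ ys, ¬ (y < b)) : tpCount (xs ++ ys) bs = tpCount xs bs := by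
  induction bs generalizing xs with
  | nil => simp
  | cons b bs ih =>
    cases xs with
    | nil =>
      simp only [List.nil_append, tpCount_nil_left]
      exact tpCount_zero_of_forall h
    | cons x xs' =>
      rw [List.cons_append, tpCount_cons_cons, tpCount_cons_cons]
      by_cases hx : x < b
      · rw [if_pos hx, if_pos hx,
          ih (fun b' hb' y' hy' => h b' (by simp [hb']) y' hy')]
      · rw [if_neg hx, if_neg hx, ← List.cons_append,
          ih (fun b' hb' y' hy' => h b' (by simp [hb']) y' hy')]

-- with strictly more b's than a's, dropping the smallest b changes nothing
lemma tpCount_tail {as S : List Int} (hS : S.Pairwise (· ≤ ·))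
    (hl : as.length < S.length) : tpCount as S = tpCount as S.tail := by
  induction as generalizing S with
  | nil => simp
  | cons a as' ih =>
    cases S with
    | nil => simp at hl
    | cons c S' =>
      rcases List.pairwise_cons.mp hS with ⟨hc, hS'⟩
      simp only [List.tail_cons]
      rw [tpCount_cons_cons]
      by_cases hac : a < c
      · rw [if_pos hac]
        cases S' with
        | nil => simp at hl
        | cons c' S'' =>
          have hcc' : c ≤ c' := hc c' (by simp)
          rw [tpCount_cons_cons, if_pos (by omega)]
          have := ih hS' (by simp at hl ⊢; omega)
          simp only [List.tail_cons] at this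
          omega
      · rw [if_neg hac]

-- a block of sure winners consumes the first |xs| b's
lemma tpCount_block_small {xs ys bs : List Int}
    (h : ∀ x ∈ xs, ∀ b ∈ bs, x < b) (hl : xs.length ≤ bs.length) :
    tpCount (xs ++ ys) bs = (xs.length : Int) + tpCount ys (bs.drop xs.length) := by
  induction xs generalizing bs with
  | nil => simp
  | cons x xs' ih =>
    cases bs with
    | nil => simp at hl
    | cons b bs' =>
      rw [List.cons_append, tpCount_cons_cons, if_pos (h x (by simp) b (by simp))]
      rw [ih (fun x' hx' b' hb' => h x' (by simp [hx']) b' (by simp [hb'])) (by simpa using hl)]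
      simp
      omega

-- a block of sure winners at least as long as bs consumes all of bs
lemma tpCount_block_big {xs ys bs : List Int}
    (h : ∀ x ∈ xs, ∀ b ∈ bs, x < b) (hl : bs.length ≤ xs.length) :
    tpCount (xs ++ ys) bs = (bs.length : Int) := by
  induction xs generalizing bs with
  | nil =>
    cases bs with
    | nil => simp
    | cons b bs' => simp at hl
  | cons x xs' ih =>
    cases bs with
    | nil => simp
    | cons b bs' =>
      rw [List.cons_append, tpCount_cons_cons, if_pos (h x (by simp) b (by simp))]
      rw [ih (fun x' hx' b' hb' => h x' (by simp [hx']) b' (by simp [hb'])) (by simpa using hl)]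
      simp only [List.length_cons]
      push_cast
      ring

-- skipping a prefix of b's that beat nothing of a :: as
lemma tpCount_skip {a : Int} {as pre bs : List Int}
    (h : ∀ x ∈ pre, ¬ (a < x)) : tpCount (a :: as) (pre ++ bs) = tpCount (a :: as) bs := by
  induction pre with
  | nil => simp
  | cons c pre' ih =>
    rw [List.cons_append, tpCount_cons_cons, if_neg (h c (by simp))]
    exact ih (fun x hx => h x (by simp [hx]))

-- inserting an element that beats no b changes nothing
lemma tpCount_insT_useless {a : Int} {as bs : List Int}
    (has : as.Pairwise (· ≤ ·)) (hall : ∀ b ∈ bs, b ≤ a) :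
    tpCount (insT a as) bs = tpCount as bs := by
  have hge : ∀ y ∈ a :: as.dropWhile (fun x => decide (x < a)), a ≤ y := by
    intro y hy
    rcases List.mem_cons.mp hy with rfl | hy
    · omega
    · exact sorted_dropWhile_lt_ge has y hy
  unfold insT
  rw [tpCount_append_right (fun b hb y hy => by have := hall b hb; have := hge y hy; omega)]
  conv_rhs => rw [← List.takeWhile_append_dropWhile
    (p := fun x => decide (x < a)) (l := as)]
  rw [tpCount_append_right (fun b hb y hy => by
    have := hall b hb
    have := hge y (by simp [hy])
    omega)]

-- KEY LEMMA (win case): if some b > a survives, inserting a wins exactly once,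
-- removing the first b > a from S
lemma tpCount_win {a : Int} {as S : List Int} (has : as.Pairwise (· ≤ ·))
    (hS : S.Pairwise (· ≤ ·)) {b : Int} {d' : List Int}
    (hd : S.dropWhile (fun x => decide (x ≤ a)) = b :: d') :
    tpCount (insT a as) S =
      1 + tpCount as (S.takeWhile (fun x => decide (x ≤ a)) ++ d') := by
  induction S generalizing as b d' with
  | nil => simp at hd
  | cons c S' ihS =>
    rcases List.pairwise_cons.mp hS with ⟨hc, hS'⟩
    by_cases hca : c ≤ a
    · -- c stays in the prefix; the first b > a comes from S'
      rw [List.dropWhile_cons_of_pos (by simpa using hca)] at hd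
      rw [List.takeWhile_cons_of_pos (by simpa using hca), List.cons_append]
      cases as with
      | nil =>
        -- LHS: [a] skips c and the kept prefix of S', then beats b
        have hb : a < b := by
          have := dropWhile_head_false hd; simpa using this
        have hins : insT a ([] : List Int) = [a] := by simp [insT]
        rw [hins, tpCount_cons_cons, if_neg (by omega)]
        have hsplit : S' = S'.takeWhile (fun x => decide (x ≤ a)) ++ (b :: d') := by
          conv_lhs => rw [← List.takeWhile_append_dropWhile
            (p := fun x => decide (x ≤ a)) (l := S')]
          rw [hd]
        rw [hsplit, tpCount_skip (by
          intro x hx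
          have := List.mem_takeWhile_imp hx
          simp at this; omega)]
        rw [tpCount_cons_cons, if_pos hb]
        simp
      | cons a' as'' =>
        rcases List.pairwise_cons.mp has with ⟨ha', has''⟩
        by_cases haa : a ≤ a'
        · -- a is the head of the insertion
          have hins : insT a (a' :: as'') = a :: a' :: as'' := by
            unfold insT
            rw [List.takeWhile_cons_of_neg (by simp; omega),
              List.dropWhile_cons_of_neg (by simp; omega)]
            simp
          rw [hins, tpCount_cons_cons, if_neg (by omega)]
          rw [tpCount_cons_cons, if_neg (by omega)]
          have := ihS has hS' hd
          rw [hins] at this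
          exact this
        · -- a' < a : a' is the head of the insertion
          have hins : insT a (a' :: as'') = a' :: insT a as'' := by
            unfold insT
            rw [List.takeWhile_cons_of_pos (by simp; omega),
              List.dropWhile_cons_of_pos (by simp; omega)]
            simp
          rw [hins]
          by_cases hca' : a' < c
          · rw [tpCount_cons_cons, if_pos hca']
            rw [tpCount_cons_cons, if_pos hca']
            have := ihS has'' hS' hd
            omega
          · rw [tpCount_cons_cons, if_neg hca']
            rw [tpCount_cons_cons, if_neg hca']
            have := ihS has hS' hd
            rw [hins] at this
            exact this
    · -- a < c : every element of S beats a; b = c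
      have hac : a < c := by omega
      rw [List.dropWhile_cons_of_neg (by simpa using hca)] at hd
      cases hd
      rw [List.takeWhile_cons_of_neg (by simpa using hca), List.nil_append]
      have hgeS' : ∀ x ∈ S', c ≤ x := hc
      set t₁ := as.takeWhile (fun x => decide (x < a)) with ht₁
      set d₁ := as.dropWhile (fun x => decide (x < a)) with hd₁
      have hsplitas : as = t₁ ++ d₁ := (List.takeWhile_append_dropWhile ..).symm
      have ht₁lt : ∀ x ∈ t₁, x < a := by
        intro x hx
        have := List.mem_takeWhile_imp hx; simpa using this
      have hwinsmall : ∀ x ∈ t₁ ++ [a], ∀ y ∈ c :: S', x < y := by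
        intro x hx y hy
        have hxa : x ≤ a := by
          rcases List.mem_append.mp hx with hx | hx
          · have := ht₁lt x hx; omega
          · simp at hx; omega
        rcases List.mem_cons.mp hy with rfl | hy
        · omega
        · have := hgeS' y hy; omega
      have hwinS' : ∀ x ∈ t₁, ∀ y ∈ S', x < y := by
        intro x hx y hy
        have := ht₁lt x hx; have := hgeS' y hy; omega
      have hinsT : insT a as = (t₁ ++ [a]) ++ d₁ := by
        simp [insT, ← ht₁, ← hd₁]
      by_cases hlen : t₁.length ≤ S'.length
      · rw [hinsT, tpCount_block_small hwinsmall (by simp; omega)]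
        conv_rhs => rw [hsplitas]
        rw [tpCount_block_small hwinS' (by omega)]
        have hdrop : (c :: S').drop (t₁ ++ [a]).length = S'.drop t₁.length := by
          simp
        rw [hdrop]
        simp only [List.length_append, List.length_cons, List.length_nil]
        push_cast
        ring
      · rw [hinsT, tpCount_block_big hwinsmall (by simp; omega)]
        conv_rhs => rw [hsplitas]
        rw [tpCount_block_big hwinS' (by omega)]
        simp only [List.length_cons]
        push_cast
        ring

-- KEY LEMMA (loss case): if nothing beats a, inserting a and dropping min(S) cancel
lemma tpCount_nowin {a : Int} {as S : List Int} (has : as.Pairwise (· ≤ ·))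
    (hS : S.Pairwise (· ≤ ·)) (hall : ∀ x ∈ S, x ≤ a)
    (hl : as.length < S.length) :
    tpCount (insT a as) S = tpCount as S.tail := by
  rw [tpCount_insT_useless has hall]
  exact tpCount_tail hS hl

-- bisect_right on a sorted list = length of the prefix of elements ≤ a
lemma bisectRight_eq_takeWhile (Bs : List Int) (a : Int)
    (hS : Bs.Pairwise (· ≤ ·)) :
    PySem.List.bisectRight Bs a = (Bs.takeWhile (fun x => decide (x ≤ a))).length := by
  obtain ⟨h1, h2, h3⟩ := PySem.List.bisectRight_spec Bs a hS
  set n := PySem.List.bisectRight Bs a with hn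
  set t := Bs.takeWhile (fun x => decide (x ≤ a)) with ht
  set d := Bs.dropWhile (fun x => decide (x ≤ a)) with hdd
  have hsplit : Bs = t ++ d := (List.takeWhile_append_dropWhile ..).symm
  have hlenBs : Bs.length = t.length + d.length := by
    conv_lhs => rw [hsplit]
    simp
  rcases lt_trichotomy n t.length with h | h | h
  · exfalso
    have hnlt : n < Bs.length := by omega
    have ha := h3 n hnlt le_rfl
    simp only [hsplit] at ha
    rw [getElem_append_left' t d n h] at ha
    have hmem : t[n]'h ∈ t := List.getElem_mem h
    have := List.mem_takeWhile_imp hmem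
    simp at this
    omega
  · exact h
  · exfalso
    have htlt : t.length < Bs.length := by omega
    cases hd2 : d with
    | nil => rw [hd2] at hlenBs; simp at hlenBs; omega
    | cons b d' =>
      have hb := h2 t.length htlt h
      simp only [hsplit, hd2] at hb
      rw [getElem_len_append t b d'] at hb
      have hpb : ¬ (b ≤ a) := by
        have := dropWhile_head_false (p := fun x => decide (x ≤ a)) (hdd ▸ hd2)
        simpa using this
      omega

-- A's loop equals the two-pointer count of sorted(A) against the current B
lemma solutionLoop_eq_tpCount (As : List Int) :
    ∀ (Bs : List Int) (win : Int), Bs.Pairwise (· ≤ ·) → As.length ≤ Bs.length →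
      solutionLoop As win Bs = win + tpCount (PySem.List.sorted As (fun x => x)) Bs := by
  induction As with
  | nil =>
    intro Bs win _ _
    have h0 : PySem.List.sorted ([] : List Int) (fun x => x) = [] := by
      simpa using PySem.List.sorted_perm ([] : List Int) (fun x => x) false
    simp [solutionLoop, h0]
  | cons a rest ih =>
    intro Bs win hS hlen
    simp only [solutionLoop]
    have hbr := bisectRight_eq_takeWhile Bs a hS
    set t := Bs.takeWhile (fun x => decide (x ≤ a)) with htdef
    set d := Bs.dropWhile (fun x => decide (x ≤ a)) with hddef
    have hsplit : Bs = t ++ d := (List.takeWhile_append_dropWhile ..).symm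
    have hlenBs : Bs.length = t.length + d.length := by
      conv_lhs => rw [hsplit]
      simp
    have hrest : (PySem.List.sorted (a :: rest) (fun x => x)) =
        insT a (PySem.List.sorted rest (fun x => x)) := sorted_cons_eq_insT a rest
    have hsortedpw : (PySem.List.sorted rest (fun x => x)).Pairwise (· ≤ ·) := by
      simpa using PySem.List.sorted_pairwise rest (fun x => x)
    have hsortedlen : (PySem.List.sorted rest (fun x => x)).length = rest.length :=
      PySem.List.length_sorted ..
    by_cases hcase : PySem.List.bisectRight Bs a < Bs.length
    · -- win branch
      rw [if_pos hcase]
      cases hd : d with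
      | nil =>
        exfalso
        rw [hd] at hlenBs
        simp at hlenBs
        omega
      | cons b d' =>
        have hpop : PySem.List.pop? Bs ((PySem.List.bisectRight Bs a : Nat) : Int) =
            some (Bs[PySem.List.bisectRight Bs a]'hcase,
              Bs.eraseIdx (PySem.List.bisectRight Bs a)) :=
          PySem.List.pop?_natCast Bs _ hcase
        rw [hpop]
        have herase : Bs.eraseIdx (PySem.List.bisectRight Bs a) = t ++ d' := by
          rw [hbr]
          conv_lhs => rw [hsplit, hd]
          exact eraseIdx_len_append t b d'
        simp only [Option.map_some, Option.getD_some]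
        rw [herase]
        have hsub : (t ++ d').Sublist Bs := by
          rw [hsplit, hd]
          exact (List.sublist_cons_self b d').append_left t
        have hpw' : (t ++ d').Pairwise (· ≤ ·) := List.Pairwise.sublist hsub hS
        have hdl : d.length = d'.length + 1 := by rw [hd]; simp
        have hlen' : rest.length ≤ (t ++ d').length := by
          simp only [List.length_append]
          simp at hlen
          omega
        rw [ih (t ++ d') (win + 1) hpw' hlen']
        rw [hrest]
        rw [tpCount_win hsortedpw hS (by rw [← hddef, hd]), ← htdef]
        omega
    · -- loss branch: all of Bs ≤ a, pop index 0
      rw [if_neg hcase]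
      have hdnil : d = [] := by
        have : Bs.length ≤ t.length := by omega
        rw [← List.length_eq_zero_iff]
        omega
      have hall : ∀ x ∈ Bs, x ≤ a := by
        intro x hx
        have hmem : x ∈ t := by
          rw [hsplit, hdnil, List.append_nil] at hx
          exact hx
        have := List.mem_takeWhile_imp hmem
        simpa using this
      have hpos : 0 < Bs.length := by
        simp at hlen
        omega
      rw [show (0 : Int) = ((0 : Nat) : Int) by simp,
        PySem.List.pop?_natCast Bs 0 hpos]
      simp only [Option.map_some, Option.getD_some, List.eraseIdx_zero]
      rw [ih Bs.tail win (List.Pairwise.sublist (List.tail_sublist Bs) hS)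
        (by simp [List.length_tail]; simp at hlen; omega)]
      rw [hrest]
      rw [tpCount_nowin hsortedpw hS hall (by rw [hsortedlen]; simp at hlen; omega)]

-- B's loop is the two-pointer count from position i
lemma altLoop_eq_tpCount (sa : List Int) (sb : List Int) :
    ∀ (i : Nat) (win : Int), altLoop sa sb i win = win + tpCount (sa.drop i) sb := by
  induction sb with
  | nil => intro i win; simp [altLoop]
  | cons b rest ih =>
    intro i win
    simp only [altLoop]
    by_cases hi : i < sa.length
    · have hdrop : sa.drop i = sa[i] :: sa.drop (i + 1) := List.drop_eq_getElem_cons hi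
      have hget : PySem.List.pyGetD sa (i : Int) 0 = sa[i] := by
        rw [PySem.List.pyGetD_natCast]
        exact List.getD_eq_getElem sa 0 hi
      by_cases hb : sa[i] < b
      · rw [if_pos (by simp [hi, hget, hb])]
        rw [ih (i + 1) (win + 1), hdrop, tpCount_cons_cons, if_pos hb]
        omega
      · rw [if_neg (by simp [hi, hget, hb])]
        rw [ih i win, hdrop, tpCount_cons_cons, if_neg hb, ← hdrop]
    · rw [if_neg (by simp [hi])]
      rw [ih i win, List.drop_eq_nil_of_le (by omega)]
      simp
-- ===== VERDICT (by name: the statement is the Claim_ definition above) =====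
theorem solution_spec : Claim_equal_solution := by
  unfold Claim_equal_solution
  intro A B _ hpre
  unfold Spec_solution solution solution_alt
  have hpwB : (PySem.List.sorted B (fun x => x)).Pairwise (· ≤ ·) := by
    simpa using PySem.List.sorted_pairwise B (fun x => x)
  have hlen : A.length ≤ (PySem.List.sorted B (fun x => x)).length := by
    rw [PySem.List.length_sorted]; exact hpre
  rw [solutionLoop_eq_tpCount A _ 0 hpwB hlen, altLoop_eq_tpCount _ _ 0 0]
  simp
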